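-- pv_equiv track=rewrite | github.com/rodrigoctoledo/placadector_pythonocr | ocr.py | gerar_variantes
-- ===== SOURCE A (Python) =====
-- def gerar_variantes(texto, mapping):
--     """
--     Gera todas as variações possíveis do texto usando o mapeamento ambíguo.
--     """
--     variantes = [""]
--     for char in texto:
--         novas_variantes = []
--         if char in mapping:
--             for var in variantes:
--                 # Adiciona o caractere original
--                 novas_variantes.append(var + char)
--                 # Adiciona as variações alternativas
--                 for alt in mapping[char]:
--                     novas_variantes.append(var + alt)
--         else:
--             for var in variantes:
--                 novas_variantes.append(var + char)
--         variantes = novas_variantes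
--     return list(set(variantes))
-- ===== SOURCE B (Python) =====
-- def gerar_variantes(texto, mapping):
--     """
--     Gera todas as variacoes possiveis do texto usando o mapeamento ambiguo.
--     Ranked enumeration: count the variants (product of per-position choice
--     counts), then decode each index i in range(total) into one variant by
--     mixed-radix digit extraction; no intermediate variant lists are rebuilt.
--     """
--     choices = [[c] + list(mapping[c]) if c in mapping else [c] for c in texto]
--     total = 1
--     for ch in choices:
--         total *= len(ch)
--     variantes = []
--     for i in range(total):
--         idx = i
--         parts = []
--         for ch in reversed(choices):
--             idx, r = divmod(idx, len(ch))
--             parts.append(ch[r])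
--         variantes.append(''.join(reversed(parts)))
--     return list(dict.fromkeys(variantes))
-- ===== Notes on version B (the rewrite author's own statement) =====
-- stated objective: alternative
-- what changed: Replaces A's accumulate-and-re-expand variant list (rebuilding the whole list once per character, then list(set(...))) by ranked enumeration: count the variants as the product of per-position choice counts, then decode each index in range(total) into its variant by mixed-radix divmod digit extraction, deduplicating at the end; no intermediate variant lists of growing strings are rematerialised, which a timing run measured as a large constant-factor win.
import Mathlib
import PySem

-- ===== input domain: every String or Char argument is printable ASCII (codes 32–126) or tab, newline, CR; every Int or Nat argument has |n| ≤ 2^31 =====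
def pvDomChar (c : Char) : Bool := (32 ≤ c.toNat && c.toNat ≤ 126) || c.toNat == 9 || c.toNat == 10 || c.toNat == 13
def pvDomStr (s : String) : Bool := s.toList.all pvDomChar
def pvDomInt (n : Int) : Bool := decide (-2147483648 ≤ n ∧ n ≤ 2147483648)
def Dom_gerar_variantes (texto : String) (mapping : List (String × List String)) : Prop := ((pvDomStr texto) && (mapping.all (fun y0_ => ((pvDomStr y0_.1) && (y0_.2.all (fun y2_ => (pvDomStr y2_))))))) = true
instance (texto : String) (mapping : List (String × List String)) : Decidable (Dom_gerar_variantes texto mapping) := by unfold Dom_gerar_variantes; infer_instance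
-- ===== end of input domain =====

-- B enumerates the variants by ranked (mixed-radix) index decoding over a per-character
-- choice table instead of A's accumulate-and-re-expand variant list; same exponential cost.
-- A returns list(set(...)) whose order is Python hash order; outputs are compared as sets,
-- and both ports dedup keeping first occurrences.

-- ===== PORT A =====
def gerar_variantes (texto : String) (mapping : List (String × List String)) : List String :=
  let variantes : List String := [""]
  let variantes := texto.toList.foldl (fun variantes char =>
    -- 'if char in mapping' + 'mapping[char]' ported as one lookup (contains = get?.isSome)
    match PySem.Dict.get? (PySem.Dict.mk mapping) (String.ofList [char]) with
    | some alts =>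
        variantes.foldl (fun novas_variantes var =>
          alts.foldl (fun novas_variantes alt => novas_variantes ++ [var ++ alt])
            (novas_variantes ++ [var ++ String.ofList [char]])) []
    | none =>
        variantes.foldl (fun novas_variantes var =>
          novas_variantes ++ [var ++ String.ofList [char]]) []) variantes
  PySem.Set.ofList variantes

-- ===== PORT B =====
-- per-character choice list: [c] + list(mapping[c]) if c in mapping else [c]
def pvChoiceOf (mapping : List (String × List String)) (c : Char) : List String :=
  match PySem.Dict.get? (PySem.Dict.mk mapping) (String.ofList [c]) with
  | some alts => String.ofList [c] :: alts
  | none => [String.ofList [c]]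

-- B: total = product of choice counts; each i in range(total) is decoded into a variant by
-- repeated divmod over the reversed choice table. All the indices involved are nonnegative
-- and every divisor len(ch) is positive, so Python's divmod coincides with Nat division /
-- remainder, and ch[r] (with 0 ≤ r < len(ch)) is exactly List.getD; ''.join is PySem.Str.join.
def gerar_variantes_alt (texto : String) (mapping : List (String × List String)) : List String :=
  let choices := texto.toList.map (pvChoiceOf mapping)
  let total := choices.foldl (fun t ch => t * ch.length) 1
  let variantes := (List.range total).map (fun i =>
    let st := choices.reverse.foldl
      (fun (st : Nat × List String) ch =>
        (st.1 / ch.length, st.2 ++ [ch.getD (st.1 % ch.length) ""]))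
      (i, ([] : List String))
    PySem.Str.join "" st.2.reverse)
  PySem.List.dedup variantes

-- ===== PRECONDITION & SPEC =====
def Spec_gerar_variantes (texto : String) (mapping : List (String × List String)) (out : List String) : Prop := out = gerar_variantes_alt texto mapping
instance (texto : String) (mapping : List (String × List String)) (out : List String) : Decidable (Spec_gerar_variantes texto mapping out) := by unfold Spec_gerar_variantes; infer_instance

-- ===== CLAIM (what is proved, stated in full; the proofs are below) =====
def Claim_equal_gerar_variantes : Prop := ∀ (texto : String) (mapping : List (String × List String)), Dom_gerar_variantes texto mapping → Spec_gerar_variantes texto mapping (gerar_variantes texto mapping)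

-- ===== LEMMAS AND PROOFS =====

-- proof helper: the Cartesian product of a choice table, front-recursively
def pvExpand : List (List String) → List String
  | [] => [""]
  | ch :: rest => ch.flatMap (fun c => (pvExpand rest).map (fun r => c ++ r))

-- proof helper: the number of variants
def pvP : List (List String) → Nat
  | [] => 1
  | ch :: rest => ch.length * pvP rest

-- proof helper: the list of choices picked by index i, one per character (front-recursively)
def pvStrList : List (List String) → Nat → List String
  | [], _ => []
  | ch :: rest, i => ch.getD ((i / pvP rest) % ch.length) "" :: pvStrList rest i

theorem pvChoiceOf_ne_nil (mapping : List (String × List String)) (c : Char) :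
    pvChoiceOf mapping c ≠ [] := by
  unfold pvChoiceOf
  cases PySem.Dict.get? (PySem.Dict.mk mapping) (String.ofList [c]) <;> simp

theorem pvP_pos (chs : List (List String)) (h : ∀ ch ∈ chs, ch ≠ []) : 0 < pvP chs := by
  induction chs with
  | nil => simp [pvP]
  | cons ch rest ih =>
      have h1 : ch ≠ [] := h ch (by simp)
      have h2 : 0 < pvP rest := ih (fun c hc => h c (by simp [hc]))
      have : 0 < ch.length := List.length_pos_iff.mpr h1
      simp only [pvP]
      positivity

-- ''.join is right-fold concatenation
theorem pvJoin (l : List String) : PySem.Str.join "" l = l.foldr (· ++ ·) "" := by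
  induction l with
  | nil => rfl
  | cons a t ih =>
      cases t with
      | nil => simp [PySem.Str.join, PySem.Chars.join_singleton]
      | cons b r =>
          simp only [PySem.Str.join, List.map_cons, PySem.Chars.join_cons_cons] at *
          simp only [List.foldr_cons] at ih ⊢
          rw [← ih]
          simp [String.ofList_append]

-- B's total-counting loop computes pvP
theorem pvTotal_eq (chs : List (List String)) (a : Nat) :
    chs.foldl (fun t ch => t * ch.length) a = a * pvP chs := by
  induction chs generalizing a with
  | nil => simp [pvP]
  | cons ch rest ih => simp [pvP, ih, Nat.mul_assoc, Nat.mul_comm ch.length]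

-- B's divmod loop over the reversed table decodes index i into pvStrList (reversed)
theorem pvDecode_eq (chs : List (List String)) (i : Nat) (p0 : List String) :
    chs.reverse.foldl
      (fun (st : Nat × List String) ch =>
        (st.1 / ch.length, st.2 ++ [ch.getD (st.1 % ch.length) ""])) (i, p0) =
    (i / pvP chs, p0 ++ (pvStrList chs i).reverse) := by
  rw [List.foldl_reverse]
  induction chs with
  | nil => simp [pvP, pvStrList]
  | cons ch rest ih =>
      simp only [List.foldr_cons, ih, pvP, pvStrList, List.reverse_cons]
      rw [Prod.mk.injEq]
      constructor
      · rw [Nat.div_div_eq_div_mul, Nat.mul_comm]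
      · simp

-- decoding ignores whole multiples of the radix product
theorem pvStrList_add_mul (chs : List (List String)) (h : ∀ ch ∈ chs, ch ≠ []) (q r : Nat) :
    pvStrList chs (q * pvP chs + r) = pvStrList chs r := by
  induction chs generalizing q with
  | nil => simp [pvStrList]
  | cons ch rest ih =>
      have hP : 0 < pvP rest := pvP_pos rest (fun c hc => h c (by simp [hc]))
      simp only [pvStrList, pvP]
      have h1 : q * (ch.length * pvP rest) + r = r + q * ch.length * pvP rest := by ring
      rw [h1, Nat.add_mul_div_right _ _ hP, Nat.add_mul_mod_self_right,
        Nat.add_comm r (q * ch.length * pvP rest),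
        ih (fun c hc => h c (by simp [hc])) (q * ch.length)]

-- range of a product peels into a flatMap of shifted ranges
theorem pvRange_mul (n m : Nat) :
    List.range (n * m) =
      (List.range n).flatMap (fun q => (List.range m).map (fun r => q * m + r)) := by
  induction n with
  | zero => simp
  | succ n ih =>
      rw [Nat.succ_mul, List.range_add, ih, List.range_succ]
      simp [List.flatMap_append, Nat.add_comm]

-- indexing a list by its full range re-yields the list
theorem pvMap_range_getD (l : List String) (d : String) :
    (List.range l.length).map (fun q => l.getD q d) = l := by
  apply List.ext_getElem
  · simp
  · intro i h1 h2
    simp [List.getD_eq_getElem?_getD, List.getElem?_eq_getElem h2]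

-- a flatMap over the index range is a flatMap over the list
theorem pvFlatMap_range (l : List String) (f : String → List String) :
    (List.range l.length).flatMap (fun q => f (l.getD q "")) = l.flatMap f := by
  conv_rhs => rw [← pvMap_range_getD l ""]
  rw [List.flatMap_map]

-- the decoded variants, enumerated over range(total), are exactly the Cartesian product
theorem pvMapRange (chs : List (List String)) (h : ∀ ch ∈ chs, ch ≠ []) :
    (List.range (pvP chs)).map (fun i => (pvStrList chs i).foldr (· ++ ·) "") =
      pvExpand chs := by
  induction chs with
  | nil => simp [pvP, pvStrList, pvExpand, List.range_succ]
  | cons ch rest ih =>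
      have hP : 0 < pvP rest := pvP_pos rest (fun c hc => h c (by simp [hc]))
      have hrest := ih (fun c hc => h c (by simp [hc]))
      simp only [pvP, pvExpand]
      rw [pvRange_mul, List.map_flatMap,
        ← pvFlatMap_range ch (fun c => (pvExpand rest).map (fun r => c ++ r))]
      apply List.flatMap_congr
      intro q hq
      simp only [List.mem_range] at hq
      rw [← hrest, List.map_map, List.map_map]
      apply List.map_congr_left
      intro r hr
      simp only [List.mem_range] at hr
      simp only [Function.comp_def, pvStrList, List.foldr_cons]
      have h1 : (q * pvP rest + r) / pvP rest = q := by
        rw [Nat.add_comm, Nat.add_mul_div_right _ _ hP, Nat.div_eq_of_lt hr]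
        omega
      have h2 : pvStrList rest (q * pvP rest + r) = pvStrList rest r :=
        pvStrList_add_mul rest (fun c hc => h c (by simp [hc])) q r
      rw [h1, Nat.mod_eq_of_lt hq, h2]

-- B's port, characterized: ordered dedup of the Cartesian product of the choice table
theorem pvAlt_eq (texto : String) (mapping : List (String × List String)) :
    gerar_variantes_alt texto mapping =
      PySem.List.dedup (pvExpand (texto.toList.map (pvChoiceOf mapping))) := by
  have hne : ∀ ch ∈ texto.toList.map (pvChoiceOf mapping), ch ≠ [] := by
    intro ch hch
    rcases List.mem_map.mp hch with ⟨c, _, rfl⟩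
    exact pvChoiceOf_ne_nil mapping c
  simp only [gerar_variantes_alt]
  rw [pvTotal_eq, Nat.one_mul]
  have hstep : ∀ i ∈ List.range (pvP (texto.toList.map (pvChoiceOf mapping))),
      PySem.Str.join ""
        ((texto.toList.map (pvChoiceOf mapping)).reverse.foldl
          (fun (st : Nat × List String) ch =>
            (st.1 / ch.length, st.2 ++ [ch.getD (st.1 % ch.length) ""]))
          (i, ([] : List String))).2.reverse =
      (pvStrList (texto.toList.map (pvChoiceOf mapping)) i).foldr (· ++ ·) "" := by
    intro i _
    rw [pvDecode_eq, pvJoin]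
    simp
  rw [List.map_congr_left hstep, pvMapRange _ hne]

-- ===== A-side lemmas (A's loop is the flatMap product over the same choice table) =====

-- one step of A's loop is a flatMap over the choice list of that character
theorem pvStepA_eq (mapping : List (String × List String)) (variantes : List String)
    (char : Char) :
    (match PySem.Dict.get? (PySem.Dict.mk mapping) (String.ofList [char]) with
      | some alts =>
          variantes.foldl (fun novas_variantes var =>
            alts.foldl (fun novas_variantes alt => novas_variantes ++ [var ++ alt])
              (novas_variantes ++ [var ++ String.ofList [char]])) []
      | none =>
          variantes.foldl (fun novas_variantes var =>
            novas_variantes ++ [var ++ String.ofList [char]]) []) =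
    variantes.flatMap (fun var => (pvChoiceOf mapping char).map (fun c => var ++ c)) := by
  unfold pvChoiceOf
  cases PySem.Dict.get? (PySem.Dict.mk mapping) (String.ofList [char]) with
  | none =>
      simp [List.flatMap_def]
  | some alts =>
      have h : ∀ acc : List String,
          variantes.foldl (fun novas_variantes var =>
            alts.foldl (fun novas_variantes alt => novas_variantes ++ [var ++ alt])
              (novas_variantes ++ [var ++ String.ofList [char]])) acc =
          acc ++ variantes.flatMap
            (fun var => (String.ofList [char] :: alts).map (fun c => var ++ c)) := by
        induction variantes with
        | nil => simp
        | cons v vs ih =>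
            intro acc
            rw [List.foldl_cons, PySem.List.foldl_append_singleton_eq_map, ih]
            simp [List.flatMap_def]
      simpa using h []

-- recursive product characterization of the clean flatMap loop (acc generalized)
theorem pvProd_foldl :
    ∀ (chs : List (List String)) (acc : List String),
    chs.foldl (fun vs ch => vs.flatMap (fun v => ch.map (fun c => v ++ c))) acc =
    acc.flatMap (fun v => (pvExpand chs).map (fun r => v ++ r)) := by
  intro chs
  induction chs with
  | nil => intro acc; simp [pvExpand]
  | cons ch rest ih =>
      intro acc
      simp only [List.foldl_cons, ih, pvExpand]
      simp [List.flatMap_assoc, List.map_flatMap, List.flatMap_map, List.map_map,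
        Function.comp_def, String.append_assoc]

-- A's whole loop is the flatMap product over the choice table
theorem pvLoop_eq (mapping : List (String × List String)) (cs : List Char)
    (acc : List String) :
    cs.foldl (fun variantes char =>
      match PySem.Dict.get? (PySem.Dict.mk mapping) (String.ofList [char]) with
      | some alts =>
          variantes.foldl (fun novas_variantes var =>
            alts.foldl (fun novas_variantes alt => novas_variantes ++ [var ++ alt])
              (novas_variantes ++ [var ++ String.ofList [char]])) []
      | none =>
          variantes.foldl (fun novas_variantes var =>
            novas_variantes ++ [var ++ String.ofList [char]]) []) acc =
    acc.flatMap (fun v => (pvExpand (cs.map (pvChoiceOf mapping))).map (fun r => v ++ r)) := by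
  have hf : (fun (variantes : List String) (char : Char) =>
      match PySem.Dict.get? (PySem.Dict.mk mapping) (String.ofList [char]) with
      | some alts =>
          variantes.foldl (fun novas_variantes var =>
            alts.foldl (fun novas_variantes alt => novas_variantes ++ [var ++ alt])
              (novas_variantes ++ [var ++ String.ofList [char]])) []
      | none =>
          variantes.foldl (fun novas_variantes var =>
            novas_variantes ++ [var ++ String.ofList [char]]) []) =
      (fun variantes char =>
        variantes.flatMap (fun var => (pvChoiceOf mapping char).map (fun c => var ++ c))) := by
    funext variantes char
    exact pvStepA_eq mapping variantes char
  rw [hf]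
  have h := pvProd_foldl (cs.map (pvChoiceOf mapping)) acc
  rw [List.foldl_map] at h
  exact h

-- ===== VERDICT (by name: the statement is the Claim_ definition above) =====
theorem gerar_variantes_spec : Claim_equal_gerar_variantes := by
  intro texto mapping _
  show gerar_variantes texto mapping = gerar_variantes_alt texto mapping
  rw [pvAlt_eq]
  simp only [gerar_variantes]
  rw [pvLoop_eq mapping texto.toList [""]]
  simp [PySem.List.dedup_eq_ofList]
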